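-- pv_equiv track=rewrite | github.com/abiisnn/Natural-Language-Processing | Notes/Practice/TagsContext.py | initializeContext
-- ===== SOURCE A (Python) =====
-- def initializeContext(tokens, vocabulary, lemmas):
-- 	contexto = {}
-- 	for word in vocabulary:
-- 		contexto[word] = []
--
-- 	for i in range(len(tokens)):
-- 		token = tokens[i]
-- 		if token in lemmas:
-- 			lemma = lemmas[token]
-- 			if lemma in contexto:
-- 				contexto[lemma].append(i)
-- 	return contexto
-- ===== SOURCE B (Python) =====
-- def initializeContext(tokens, vocabulary, lemmas):
--     # Vocabulary-outer nested scan: for each vocabulary word, collect the token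
--     # positions whose lemma equals that word, as a single dict comprehension.
--     return {word: [i for i, t in enumerate(tokens) if lemmas.get(t) == word]
--             for word in vocabulary}
-- ===== Notes on version B (the rewrite author's own statement) =====
-- stated objective: simpler
-- what changed: Instead of seeding a result dict and appending into it during one filtered pass over tokens, B is a single dict comprehension with a nested scan: for each vocabulary word it collects the token positions whose lemma equals that word.
import Mathlib
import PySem

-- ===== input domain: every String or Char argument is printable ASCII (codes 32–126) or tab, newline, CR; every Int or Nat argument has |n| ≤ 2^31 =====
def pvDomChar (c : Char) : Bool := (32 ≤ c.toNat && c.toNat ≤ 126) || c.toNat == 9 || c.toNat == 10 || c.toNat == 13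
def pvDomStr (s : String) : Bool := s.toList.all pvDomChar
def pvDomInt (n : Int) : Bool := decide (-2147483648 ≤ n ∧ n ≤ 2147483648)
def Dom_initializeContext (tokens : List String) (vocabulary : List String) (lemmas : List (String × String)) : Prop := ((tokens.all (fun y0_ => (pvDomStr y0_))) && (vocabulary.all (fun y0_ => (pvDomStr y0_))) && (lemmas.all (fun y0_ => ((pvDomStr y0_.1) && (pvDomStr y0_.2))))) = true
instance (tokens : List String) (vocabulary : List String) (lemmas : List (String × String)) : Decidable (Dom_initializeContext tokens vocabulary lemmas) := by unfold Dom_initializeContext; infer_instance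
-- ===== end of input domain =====

-- B replaces A's seeded-dict single pass over tokens by a dict comprehension with a
-- nested scan: per vocabulary word, the positions whose lemma equals that word
-- (objective: simpler; O(V*T) instead of O(V+T), no speed claim).

-- ===== PORT A =====
-- shared decoding of the dict parameter `lemmas`: first-match association-list lookup
def pvLemGet? (lemmas : List (String × String)) (t : String) : Option String :=
  (lemmas.find? (fun q => q.1 == t)).map (fun q => q.2)

-- body of A's token loop: 'if token in lemmas: lemma = lemmas[token]; if lemma in contexto: contexto[lemma].append(i)'
def pvStepA (lemmas : List (String × String)) (d : PySem.Dict String (List Int))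
    (i : Int) (token : String) : PySem.Dict String (List Int) :=
  match pvLemGet? lemmas token with
  | some lm => if d.contains lm then d.modify lm [] (fun v => v ++ [i]) else d
  | none => d

def initializeContext (tokens : List String) (vocabulary : List String) (lemmas : List (String × String)) : List (String × List Int) :=
  -- contexto = {}; for word in vocabulary: contexto[word] = []
  let c0 : PySem.Dict String (List Int) :=
    vocabulary.foldl (fun d w => d.insert w []) PySem.Dict.empty
  -- for i in range(len(tokens)): token = tokens[i]; …
  ((PySem.List.pyRange 0 (PySem.List.len tokens) 1).foldl
    (fun d i => pvStepA lemmas d i (PySem.List.pyGetD tokens i "")) c0).items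

-- ===== PORT B =====
-- '[i for i, t in enumerate(tokens) if lemmas.get(t) == word]'
def pvComp (lemmas : List (String × String)) (tokens : List String) (w : String) : List Int :=
  ((PySem.List.enumerate tokens).filter (fun p => pvLemGet? lemmas p.2 == some w)).map (fun p => p.1)

def initializeContext_alt (tokens : List String) (vocabulary : List String) (lemmas : List (String × String)) : List (String × List Int) :=
  -- {word: [i for i, t in enumerate(tokens) if lemmas.get(t) == word] for word in vocabulary}
  (vocabulary.foldl (fun d w => d.insert w (pvComp lemmas tokens w)) PySem.Dict.empty).items

-- ===== PRECONDITION & SPEC =====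
def Spec_initializeContext (tokens : List String) (vocabulary : List String) (lemmas : List (String × String)) (out : List (String × List Int)) : Prop := out = initializeContext_alt tokens vocabulary lemmas
instance (tokens : List String) (vocabulary : List String) (lemmas : List (String × String)) (out : List (String × List Int)) : Decidable (Spec_initializeContext tokens vocabulary lemmas out) := by unfold Spec_initializeContext; infer_instance

-- ===== CLAIM (what is proved, stated in full; the proofs are below) =====
def Claim_equal_initializeContext : Prop := ∀ (tokens : List String) (vocabulary : List String) (lemmas : List (String × String)), Dom_initializeContext tokens vocabulary lemmas → Spec_initializeContext tokens vocabulary lemmas (initializeContext tokens vocabulary lemmas)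

-- ===== LEMMAS AND PROOFS =====

-- positions (first components) of the enumerated tokens whose lemma is k; pvComp on enumerate tokens
def pvHits (lemmas : List (String × String)) (L : List (Int × String)) (k : String) : List Int :=
  (L.filter (fun p => pvLemGet? lemmas p.2 == some k)).map (fun p => p.1)

theorem pvComp_eq_pvHits (lemmas : List (String × String)) (tokens : List String) (w : String) :
    pvComp lemmas tokens w = pvHits lemmas (PySem.List.enumerate tokens) w := rfl

theorem pvHits_nil (lemmas : List (String × String)) (k : String) : pvHits lemmas [] k = [] := rfl

theorem pvHits_cons (lemmas : List (String × String)) (p : Int × String) (L : List (Int × String)) (k : String) :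
    pvHits lemmas (p :: L) k =
      (if pvLemGet? lemmas p.2 = some k then [p.1] else []) ++ pvHits lemmas L k := by
  simp only [pvHits, List.filter_cons]
  by_cases h : pvLemGet? lemmas p.2 = some k <;> simp [h]

-- A's token loop maps each seeded entry (k, v) to (k, v ++ hits k) and touches nothing else
theorem loopA_items (lemmas : List (String × String)) (L : List (Int × String)) :
    ∀ (d : PySem.Dict String (List Int)), d.keys.Nodup →
      (L.foldl (fun d p => pvStepA lemmas d p.1 p.2) d).items
        = d.items.map (fun q => (q.1, q.2 ++ pvHits lemmas L q.1)) := by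
  induction L with
  | nil => intro d _; simp [pvHits_nil]
  | cons p L ih =>
    intro d hnd
    simp only [List.foldl_cons]
    cases h : pvLemGet? lemmas p.2 with
    | none =>
      have hb : pvStepA lemmas d p.1 p.2 = d := by simp [pvStepA, h]
      rw [hb, ih d hnd]
      apply List.map_congr_left
      intro q _
      rw [pvHits_cons]
      simp [h]
    | some lm =>
      by_cases hc : d.contains lm = true
      · have hb : pvStepA lemmas d p.1 p.2 = d.insert lm (d.getD lm [] ++ [p.1]) := by
          simp [pvStepA, h, hc, PySem.Dict.modify]
        rw [hb, ih _ (PySem.Dict.nodup_keys_insert d lm _ hnd),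
            PySem.Dict.items_insert_of_contains d _ hc, List.map_map]
        apply List.map_congr_left
        intro q hq
        rw [pvHits_cons, h]
        by_cases hk : q.1 = lm
        · have hv : d.getD lm [] = q.2 := by
            have : (q.1, q.2) ∈ d.items := hq
            rw [hk] at this
            exact PySem.Dict.getD_of_mem_items d this hnd []
          simp [Function.comp, hk, hv, pvHits]
        · have hne2 : ¬ lm = q.1 := fun hkk => hk hkk.symm
          have : (q.1 == lm) = false := by simp [hk]
          simp [Function.comp, this, hne2]
      · have hb : pvStepA lemmas d p.1 p.2 = d := by simp [pvStepA, h, hc]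
        rw [hb, ih d hnd]
        apply List.map_congr_left
        intro q hq
        have hne : q.1 ≠ lm := by
          intro hkk
          exact hc ((PySem.Dict.contains_iff_mem_keys d lm).2
            (hkk ▸ PySem.Dict.mem_keys_of_mem_items d hq))
        rw [pvHits_cons, h]
        have hne2 : ¬ lm = q.1 := fun hkk => hne hkk.symm
        simp [hne2]

-- every value in the seeded dict is []
theorem seed_values_nil (vs : List String) :
    ∀ (d : PySem.Dict String (List Int)), (∀ q ∈ d.items, q.2 = ([] : List Int)) →
      ∀ q ∈ (vs.foldl (fun d w => d.insert w []) d).items, q.2 = ([] : List Int) := by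
  induction vs with
  | nil => intro d h; exact h
  | cons w vs ih =>
    intro d h
    refine ih _ ?_
    intro q hq
    rcases (PySem.Dict.mem_items_insert d w [] q).1 hq with heq | ⟨hm, _⟩
    · rw [heq]
    · exact h q hm

-- inserting g w over the vocabulary = seeding with [] and then mapping g over the keys
theorem project_items (g : String → List Int) (vs : List String) :
    ∀ (d d' : PySem.Dict String (List Int)),
      d'.items = d.items.map (fun q => (q.1, g q.1)) →
      (vs.foldl (fun d w => d.insert w (g w)) d').items
        = (vs.foldl (fun d w => d.insert w []) d).items.map (fun q => (q.1, g q.1)) := by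
  induction vs with
  | nil => intro d d' h; exact h
  | cons w vs ih =>
    intro d d' h
    simp only [List.foldl_cons]
    refine ih _ _ ?_
    have hcont : d'.contains w = d.contains w := by
      simp only [PySem.Dict.contains, h, List.any_map]
      rfl
    by_cases hc : d.contains w = true
    · rw [PySem.Dict.items_insert_of_contains d' (g w) (hcont ▸ hc),
          PySem.Dict.items_insert_of_contains d ([] : List Int) hc,
          h, List.map_map, List.map_map]
      apply List.map_congr_left
      intro q _
      by_cases hk : (q.1 == w) = true <;> simp [Function.comp, hk]
    · rw [PySem.Dict.items_insert_of_not_contains d' (g w)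
            (by rw [hcont]; exact Bool.not_eq_true _ ▸ (by simpa using hc)),
          PySem.Dict.items_insert_of_not_contains d ([] : List Int)
            (by simpa using hc),
          h, List.map_append]
      rfl

-- ===== VERDICT (by name: the statement is the Claim_ definition above) =====
theorem initializeContext_spec : Claim_equal_initializeContext := by
  intro tokens vocabulary lemmas _
  show ((PySem.List.pyRange 0 (PySem.List.len tokens) 1).foldl
          (fun d i => pvStepA lemmas d i (PySem.List.pyGetD tokens i ""))
          (vocabulary.foldl (fun d w => d.insert w []) PySem.Dict.empty)).items
      = (vocabulary.foldl (fun d w => d.insert w (pvComp lemmas tokens w)) PySem.Dict.empty).items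
  have hA : (PySem.List.pyRange 0 (PySem.List.len tokens) 1).foldl
        (fun d i => pvStepA lemmas d i (PySem.List.pyGetD tokens i ""))
        (vocabulary.foldl (fun d w => d.insert w []) PySem.Dict.empty)
      = (PySem.List.enumerate tokens).foldl (fun d p => pvStepA lemmas d p.1 p.2)
        (vocabulary.foldl (fun d w => d.insert w []) PySem.Dict.empty) := by
    rw [PySem.List.enumerate_eq_map_pyRange tokens "", List.foldl_map]
  have hnd : (vocabulary.foldl (fun d w => d.insert w ([] : List Int)) PySem.Dict.empty).keys.Nodup :=
    PySem.Dict.nodup_keys_foldl_insert vocabulary (fun _ _ => []) PySem.Dict.empty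
      PySem.Dict.nodup_keys_empty
  rw [hA, loopA_items lemmas _ _ hnd,
      project_items (pvComp lemmas tokens) vocabulary PySem.Dict.empty PySem.Dict.empty rfl]
  apply List.map_congr_left
  intro q hq
  have hv : q.2 = ([] : List Int) :=
    seed_values_nil vocabulary PySem.Dict.empty (by intro q hq; simp [PySem.Dict.empty] at hq) q hq
  rw [hv, pvComp_eq_pvHits]
  rfl
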